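-- pv_equiv track=rewrite | github.com/dsilva1397/Auto-PLaylist-Generation-using-Facial-Emotions | Face_emotion_recognition/Face_Emotion_run.py | avr_emotion
-- ===== SOURCE A (Python) =====
-- def avr_emotion(detected_emotions):
--
--     emotion_dict = {
--         'Fear': 0,
--         'Neutral':0,
--         'Happy':0,
--         'Sad':0,
--         'Disgust':0,
--         'Angry':0,
--         'Surprised':0
--     }
--
--     for emotion in detected_emotions:
--         if emotion == 'Neutral':
--             emotion_dict['Neutral'] +=1
--         elif emotion == 'Fear':
--             emotion_dict['Fear'] +=1
--         elif emotion =='Sad':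
--             emotion_dict['Sad'] +=1
--         elif emotion == 'Happy':
--             emotion_dict['Happy'] +=1
--         elif emotion =='Disgust':
--             emotion_dict['Disgust'] +=1
--         elif emotion == 'Angry':
--             emotion_dict['Angry'] +=1
--         elif emotion =='Surprise':
--             emotion_dict['Surprised'] +=1
--     return(emotion_dict)
-- ===== SOURCE B (Python) =====
-- def avr_emotion(detected_emotions):
--     # project the seven fixed output keys from whole-list counts ('Surprised' reads 'Surprise')
--     return {key: detected_emotions.count(src)
--             for key, src in (('Fear', 'Fear'), ('Neutral', 'Neutral'),
--                              ('Happy', 'Happy'), ('Sad', 'Sad'),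
--                              ('Disgust', 'Disgust'), ('Angry', 'Angry'),
--                              ('Surprised', 'Surprise'))}
-- ===== Notes on version B (the rewrite author's own statement) =====
-- stated objective: idiomatic
-- what changed: Replaces A's per-element if/elif counting loop over a mutable dict with a table-build-then-select dict comprehension that maps each of the seven fixed keys to list.count of its source label (with 'Surprised' taking the count of 'Surprise').
import Mathlib
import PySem

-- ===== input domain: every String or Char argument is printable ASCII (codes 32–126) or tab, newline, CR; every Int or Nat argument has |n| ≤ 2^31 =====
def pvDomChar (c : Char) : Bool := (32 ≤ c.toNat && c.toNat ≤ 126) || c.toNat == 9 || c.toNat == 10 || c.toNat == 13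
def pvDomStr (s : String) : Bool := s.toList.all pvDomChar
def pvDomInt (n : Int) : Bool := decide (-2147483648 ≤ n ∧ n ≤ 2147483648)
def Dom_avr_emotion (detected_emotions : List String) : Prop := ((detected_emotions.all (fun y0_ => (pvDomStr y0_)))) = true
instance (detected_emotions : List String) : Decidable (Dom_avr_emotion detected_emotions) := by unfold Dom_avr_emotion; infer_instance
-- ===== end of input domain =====

-- B replaces A's per-element if/elif loop with per-key whole-list counts; objective: more idiomatic.

-- ===== PORT A =====
def avrStep (d : PySem.Dict String Int) (emotion : String) : PySem.Dict String Int :=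
  if emotion = "Neutral" then d.modify "Neutral" 0 (· + 1)
  else if emotion = "Fear" then d.modify "Fear" 0 (· + 1)
  else if emotion = "Sad" then d.modify "Sad" 0 (· + 1)
  else if emotion = "Happy" then d.modify "Happy" 0 (· + 1)
  else if emotion = "Disgust" then d.modify "Disgust" 0 (· + 1)
  else if emotion = "Angry" then d.modify "Angry" 0 (· + 1)
  else if emotion = "Surprise" then d.modify "Surprised" 0 (· + 1)
  else d

def avr_emotion (detected_emotions : List String) : List (String × Int) :=
  let emotion_dict : PySem.Dict String Int :=
    PySem.Dict.ofList [("Fear", 0), ("Neutral", 0), ("Happy", 0), ("Sad", 0),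
                       ("Disgust", 0), ("Angry", 0), ("Surprised", 0)]
  (detected_emotions.foldl avrStep emotion_dict).items

-- ===== PORT B =====
def avr_emotion_alt (detected_emotions : List String) : List (String × Int) :=
  [("Fear", "Fear"), ("Neutral", "Neutral"), ("Happy", "Happy"), ("Sad", "Sad"),
   ("Disgust", "Disgust"), ("Angry", "Angry"), ("Surprised", "Surprise")].map
    (fun p => (p.1, PySem.List.count detected_emotions p.2))

-- ===== PRECONDITION & SPEC =====
def Spec_avr_emotion (detected_emotions : List String) (out : List (String × Int)) : Prop := out = avr_emotion_alt detected_emotions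
instance (detected_emotions : List String) (out : List (String × Int)) : Decidable (Spec_avr_emotion detected_emotions out) := by unfold Spec_avr_emotion; infer_instance

-- ===== CLAIM (what is proved, stated in full; the proofs are below) =====
def Claim_equal_avr_emotion : Prop := ∀ (detected_emotions : List String), Dom_avr_emotion detected_emotions → Spec_avr_emotion detected_emotions (avr_emotion detected_emotions)

-- ===== LEMMAS AND PROOFS =====
lemma avr_loop (xs : List String) (a b c d e f g : Int) :
    (xs.foldl avrStep (PySem.Dict.mk [("Fear", a), ("Neutral", b), ("Happy", c), ("Sad", d),
        ("Disgust", e), ("Angry", f), ("Surprised", g)])).items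
    = [("Fear", a + xs.count "Fear"), ("Neutral", b + xs.count "Neutral"),
       ("Happy", c + xs.count "Happy"), ("Sad", d + xs.count "Sad"),
       ("Disgust", e + xs.count "Disgust"), ("Angry", f + xs.count "Angry"),
       ("Surprised", g + xs.count "Surprise")] := by
  induction xs generalizing a b c d e f g with
  | nil => simp [PySem.Dict.items]
  | cons x xs ih =>
    simp only [List.foldl_cons, avrStep]
    split_ifs with h1 h2 h3 h4 h5 h6 h7
    · subst h1
      rw [show (PySem.Dict.mk [("Fear", a), ("Neutral", b), ("Happy", c), ("Sad", d), ("Disgust", e), ("Angry", f), ("Surprised", g)]).modify "Neutral" 0 (· + 1) = PySem.Dict.mk [("Fear", a), ("Neutral", b + 1), ("Happy", c), ("Sad", d), ("Disgust", e), ("Angry", f), ("Surprised", g)] from rfl, ih]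
      simp [List.count_cons]
      omega
    · subst h2
      rw [show (PySem.Dict.mk [("Fear", a), ("Neutral", b), ("Happy", c), ("Sad", d), ("Disgust", e), ("Angry", f), ("Surprised", g)]).modify "Fear" 0 (· + 1) = PySem.Dict.mk [("Fear", a + 1), ("Neutral", b), ("Happy", c), ("Sad", d), ("Disgust", e), ("Angry", f), ("Surprised", g)] from rfl, ih]
      simp [List.count_cons]
      omega
    · subst h3
      rw [show (PySem.Dict.mk [("Fear", a), ("Neutral", b), ("Happy", c), ("Sad", d), ("Disgust", e), ("Angry", f), ("Surprised", g)]).modify "Sad" 0 (· + 1) = PySem.Dict.mk [("Fear", a), ("Neutral", b), ("Happy", c), ("Sad", d + 1), ("Disgust", e), ("Angry", f), ("Surprised", g)] from rfl, ih]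
      simp [List.count_cons]
      omega
    · subst h4
      rw [show (PySem.Dict.mk [("Fear", a), ("Neutral", b), ("Happy", c), ("Sad", d), ("Disgust", e), ("Angry", f), ("Surprised", g)]).modify "Happy" 0 (· + 1) = PySem.Dict.mk [("Fear", a), ("Neutral", b), ("Happy", c + 1), ("Sad", d), ("Disgust", e), ("Angry", f), ("Surprised", g)] from rfl, ih]
      simp [List.count_cons]
      omega
    · subst h5
      rw [show (PySem.Dict.mk [("Fear", a), ("Neutral", b), ("Happy", c), ("Sad", d), ("Disgust", e), ("Angry", f), ("Surprised", g)]).modify "Disgust" 0 (· + 1) = PySem.Dict.mk [("Fear", a), ("Neutral", b), ("Happy", c), ("Sad", d), ("Disgust", e + 1), ("Angry", f), ("Surprised", g)] from rfl, ih]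
      simp [List.count_cons]
      omega
    · subst h6
      rw [show (PySem.Dict.mk [("Fear", a), ("Neutral", b), ("Happy", c), ("Sad", d), ("Disgust", e), ("Angry", f), ("Surprised", g)]).modify "Angry" 0 (· + 1) = PySem.Dict.mk [("Fear", a), ("Neutral", b), ("Happy", c), ("Sad", d), ("Disgust", e), ("Angry", f + 1), ("Surprised", g)] from rfl, ih]
      simp [List.count_cons]
      omega
    · subst h7
      rw [show (PySem.Dict.mk [("Fear", a), ("Neutral", b), ("Happy", c), ("Sad", d), ("Disgust", e), ("Angry", f), ("Surprised", g)]).modify "Surprised" 0 (· + 1) = PySem.Dict.mk [("Fear", a), ("Neutral", b), ("Happy", c), ("Sad", d), ("Disgust", e), ("Angry", f), ("Surprised", g + 1)] from rfl, ih]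
      simp [List.count_cons]
      omega
    · rw [ih]
      simp [List.count_cons, h1, h2, h3, h4, h5, h6, h7]
-- ===== VERDICT (by name: the statement is the Claim_ definition above) =====
theorem avr_emotion_spec : Claim_equal_avr_emotion := by
  intro xs _
  show avr_emotion xs = avr_emotion_alt xs
  have h0 : PySem.Dict.ofList ([("Fear", (0:Int)), ("Neutral", 0), ("Happy", 0), ("Sad", 0),
      ("Disgust", 0), ("Angry", 0), ("Surprised", 0)] : List (String × Int))
      = PySem.Dict.mk [("Fear", 0), ("Neutral", 0), ("Happy", 0), ("Sad", 0),
      ("Disgust", 0), ("Angry", 0), ("Surprised", 0)] := by decide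
  simp only [avr_emotion, avr_emotion_alt, h0, avr_loop, PySem.List.count_eq, List.map]
  norm_num
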